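-- pv_equiv track=rewrite | github.com/SantiagoDChappa/pygame | funcionesVACIAS.py | revision
-- ===== SOURCE A (Python) =====
-- def revision(palabraCorrecta, palabraUsuario, correctas, incorrectas, casi):
--     palabraCorrecta = palabraCorrecta.replace('\n',"").lower()
--     palabraUsuario = palabraUsuario.replace('\n',"").lower()
--     for i,letra in enumerate(palabraUsuario):
--         if palabraCorrecta[i] == palabraUsuario[i]:
--             if letra in casi:
--                 casi.pop(casi.index(letra))
--                 correctas.append(letra)
--             else:
--                 correctas.append(letra)
--         elif letra in palabraCorrecta:
--             casi.append(letra)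
--         else:
--             incorrectas.append(letra)
--     return correctas,casi,incorrectas
-- ===== SOURCE B (Python) =====
-- def revision(palabraCorrecta, palabraUsuario, correctas, incorrectas, casi):
--     # One pass with O(1) per-letter counters instead of repeated O(n) scans of
--     # casi / palabraCorrecta; returns fresh lists (A mutates its arguments).
--     pc = palabraCorrecta.replace('\n', "").lower()
--     pu = palabraUsuario.replace('\n', "").lower()
--     pc_set = set(pc)
--     cnt = {}                      # live occurrence count per value in casi
--     for x in casi:
--         cnt[x] = cnt.get(x, 0) + 1
--     rem = {}                      # successful removals per letter
--     corr_add, inc_add, app = [], [], []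
--     for i, letra in enumerate(pu):
--         if pc[i] == letra:
--             corr_add.append(letra)
--             if cnt.get(letra, 0) > 0:
--                 cnt[letra] -= 1
--                 rem[letra] = rem.get(letra, 0) + 1
--         elif letra in pc_set:
--             app.append(letra)
--             cnt[letra] = cnt.get(letra, 0) + 1
--         else:
--             inc_add.append(letra)
--     # each removal took the first live occurrence, so drop the first rem[x]
--     # occurrences of every x from the grown list
--     new_casi = []
--     for x in casi + app:
--         if rem.get(x, 0) > 0:
--             rem[x] = rem[x] - 1
--         else:
--             new_casi.append(x)
--     return correctas + corr_add, new_casi, incorrectas + inc_add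
-- ===== Notes on version B (the rewrite author's own statement) =====
-- stated objective: faster
-- what changed: A rescans casi (in/index/pop) and palabraCorrecta (in) for every letter, O(n^2); B does one pass with per-letter counters (membership set for the word, live-count and removal-count dicts) and a final pass that drops the first rem[x] occurrences of each x, O(n) (O(n+m) with the sizes of the word and casi).
import Mathlib
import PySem

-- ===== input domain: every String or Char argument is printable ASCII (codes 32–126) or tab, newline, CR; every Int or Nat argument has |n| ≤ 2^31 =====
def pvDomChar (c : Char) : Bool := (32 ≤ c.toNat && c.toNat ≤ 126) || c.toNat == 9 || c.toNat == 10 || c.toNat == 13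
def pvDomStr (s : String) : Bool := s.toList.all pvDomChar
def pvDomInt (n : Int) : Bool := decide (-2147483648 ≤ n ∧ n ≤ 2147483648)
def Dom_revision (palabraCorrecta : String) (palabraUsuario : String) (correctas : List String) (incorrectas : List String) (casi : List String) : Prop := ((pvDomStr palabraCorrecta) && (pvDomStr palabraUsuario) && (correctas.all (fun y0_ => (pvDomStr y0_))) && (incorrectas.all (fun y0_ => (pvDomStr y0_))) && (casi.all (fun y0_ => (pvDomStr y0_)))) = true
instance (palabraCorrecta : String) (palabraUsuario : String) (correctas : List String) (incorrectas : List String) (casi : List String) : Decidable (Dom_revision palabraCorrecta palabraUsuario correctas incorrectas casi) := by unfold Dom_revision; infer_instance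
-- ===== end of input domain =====

-- B replaces A's repeated O(n) scans of `casi`/`palabraCorrecta` (in, index, pop) by one pass with
-- per-letter counters; A mutates its list arguments in place, B returns fresh lists — the
-- equivalence proved here is about the RETURN value only.

-- ===== PORT A =====
-- loop body of A (i, letra) acting on the state (correctas, incorrectas, casi)
def revA_step (pc : List Char) (st : List String × List String × List String) (p : Int × Char) : List String × List String × List String :=
  let letra := String.ofList [p.2]
  if PySem.List.pyGet? pc p.1 = some p.2 then       -- palabraCorrecta[i] == palabraUsuario[i] (1-char strings compare like chars)
    if letra ∈ st.2.2 then
      -- casi.pop(casi.index(letra)) removes the first occurrence = list.remove (guarded by membership)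
      (st.1 ++ [letra], st.2.1, (PySem.List.remove? st.2.2 letra).getD st.2.2)
    else
      (st.1 ++ [letra], st.2.1, st.2.2)
  else if p.2 ∈ pc then                             -- letra in palabraCorrecta (letra is a single char)
    (st.1, st.2.1, st.2.2 ++ [letra])
  else
    (st.1, st.2.1 ++ [letra], st.2.2)

def revision (palabraCorrecta : String) (palabraUsuario : String) (correctas : List String) (incorrectas : List String) (casi : List String) : List (List String) :=
  let pc := (PySem.Str.lower (PySem.Str.replace palabraCorrecta "\n" "")).toList
  let pu := (PySem.Str.lower (PySem.Str.replace palabraUsuario "\n" "")).toList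
  let st := (PySem.List.enumerate pu).foldl (revA_step pc) (correctas, incorrectas, casi)
  [st.1, st.2.2, st.2.1]                            -- return correctas, casi, incorrectas

-- ===== PORT B =====
-- loop body of B acting on the state (cnt, rem, corr_add, inc_add, app)
def revB_step (pc : List Char) (pcSet : PySem.Set Char)
    (st : PySem.Dict String Int × PySem.Dict String Int × List String × List String × List String)
    (p : Int × Char) : PySem.Dict String Int × PySem.Dict String Int × List String × List String × List String :=
  let letra := String.ofList [p.2]
  if PySem.List.pyGet? pc p.1 = some p.2 then
    if 0 < st.1.getD letra 0 then
      (st.1.insert letra (st.1.getD letra 0 - 1), st.2.1.insert letra (st.2.1.getD letra 0 + 1),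
       st.2.2.1 ++ [letra], st.2.2.2.1, st.2.2.2.2)
    else
      (st.1, st.2.1, st.2.2.1 ++ [letra], st.2.2.2.1, st.2.2.2.2)
  else if p.2 ∈ pcSet then
    (st.1.insert letra (st.1.getD letra 0 + 1), st.2.1, st.2.2.1, st.2.2.2.1, st.2.2.2.2 ++ [letra])
  else
    (st.1, st.2.1, st.2.2.1, st.2.2.2.1 ++ [letra], st.2.2.2.2)

-- final pass of B: drop the first rem[x] occurrences of every x
def revB_drop (st : PySem.Dict String Int × List String) (x : String) : PySem.Dict String Int × List String :=
  if 0 < st.1.getD x 0 then (st.1.insert x (st.1.getD x 0 - 1), st.2) else (st.1, st.2 ++ [x])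

def revision_alt (palabraCorrecta : String) (palabraUsuario : String) (correctas : List String) (incorrectas : List String) (casi : List String) : List (List String) :=
  let pc := (PySem.Str.lower (PySem.Str.replace palabraCorrecta "\n" "")).toList
  let pu := (PySem.Str.lower (PySem.Str.replace palabraUsuario "\n" "")).toList
  let pcSet := PySem.Set.ofList pc
  let cnt0 : PySem.Dict String Int := casi.foldl (fun d x => d.insert x (d.getD x 0 + 1)) PySem.Dict.empty
  let st := (PySem.List.enumerate pu).foldl (revB_step pc pcSet) (cnt0, PySem.Dict.empty, [], [], [])
  let fin := (casi ++ st.2.2.2.2).foldl revB_drop (st.2.1, [])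
  [correctas ++ st.2.2.1, fin.2, incorrectas ++ st.2.2.2.1]

-- ===== PRECONDITION & SPEC =====
-- Pre_ excludes exactly the inputs where A raises IndexError: a cleaned user word longer than the
-- cleaned correct word makes palabraCorrecta[i] go out of range.
def Pre_revision (palabraCorrecta : String) (palabraUsuario : String) (correctas : List String) (incorrectas : List String) (casi : List String) : Prop :=
  (PySem.Str.lower (PySem.Str.replace palabraUsuario "\n" "")).toList.length ≤ (PySem.Str.lower (PySem.Str.replace palabraCorrecta "\n" "")).toList.length
instance (palabraCorrecta : String) (palabraUsuario : String) (correctas : List String) (incorrectas : List String) (casi : List String) : Decidable (Pre_revision palabraCorrecta palabraUsuario correctas incorrectas casi) := by unfold Pre_revision; infer_instance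

def pvWitness_revision : String × String × List String × List String × List String :=
  ("gato", "gteo", [], [], ["t"])

def Spec_revision (palabraCorrecta : String) (palabraUsuario : String) (correctas : List String) (incorrectas : List String) (casi : List String) (out : List (List String)) : Prop := out = revision_alt palabraCorrecta palabraUsuario correctas incorrectas casi
instance (palabraCorrecta : String) (palabraUsuario : String) (correctas : List String) (incorrectas : List String) (casi : List String) (out : List (List String)) : Decidable (Spec_revision palabraCorrecta palabraUsuario correctas incorrectas casi out) := by unfold Spec_revision; infer_instance

-- ===== CLAIM (what is proved, stated in full; the proofs are below) =====
def Claim_equal_revision : Prop := ∀ (palabraCorrecta : String) (palabraUsuario : String) (correctas : List String) (incorrectas : List String) (casi : List String), Dom_revision palabraCorrecta palabraUsuario correctas incorrectas casi → Pre_revision palabraCorrecta palabraUsuario correctas incorrectas casi → Spec_revision palabraCorrecta palabraUsuario correctas incorrectas casi (revision palabraCorrecta palabraUsuario correctas incorrectas casi)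


-- ===== LEMMAS AND PROOFS =====

-- pointwise update of a counting function
def pvUpd (f : String → Int) (x : String) (v : Int) : String → Int := fun y => if y = x then v else f y

lemma pvUpd_self (f : String → Int) (x : String) (v : Int) : pvUpd f x v x = v := by simp [pvUpd]

lemma pvUpd_ne (f : String → Int) (x : String) (v : Int) (y : String) (h : y ≠ x) : pvUpd f x v y = f y := by
  simp [pvUpd, h]

lemma pvUpd_upd (f : String → Int) (x : String) (v w : Int) : pvUpd (pvUpd f x v) x w = pvUpd f x w := by
  funext y; by_cases h : y = x <;> simp [pvUpd, h]

lemma pvUpd_id (f : String → Int) (x : String) : pvUpd f x (f x) = f := by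
  funext y; by_cases h : y = x <;> simp [pvUpd, h]

lemma pvUpd_comm (f : String → Int) (x y : String) (v w : Int) (h : x ≠ y) :
    pvUpd (pvUpd f x v) y w = pvUpd (pvUpd f y w) x v := by
  funext z; by_cases hz : z = y <;> by_cases hz' : z = x <;>
    simp_all [pvUpd]

-- abstraction of B's final pass: drop the first (f x) occurrences of every x
def pvSkipF : List String → (String → Int) → List String
  | [], _ => []
  | x :: xs, f => if 0 < f x then pvSkipF xs (pvUpd f x (f x - 1)) else x :: pvSkipF xs f

lemma pvSkipF_zero (l : List String) (f : String → Int) (h : ∀ x, f x ≤ 0) : pvSkipF l f = l := by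
  induction l generalizing f with
  | nil => rfl
  | cons x xs ih =>
      simp only [pvSkipF, if_neg (h x).not_gt]
      rw [ih f h]

lemma pvSkipF_count (l : List String) (f : String → Int) (x : String) (hx : 0 ≤ f x) :
    ((pvSkipF l f).count x : Int) = max ((l.count x : Int) - f x) 0 := by
  induction l generalizing f with
  | nil => simp [pvSkipF]; omega
  | cons y ys ih =>
      by_cases hxy : x = y
      · subst hxy
        by_cases hy : 0 < f x
        · simp only [pvSkipF, if_pos hy]
          have hih := ih (pvUpd f x (f x - 1)) (by rw [pvUpd_self]; omega)
          rw [pvUpd_self] at hih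
          rw [hih, List.count_cons_self]
          push_cast
          omega
        · simp only [pvSkipF, if_neg hy]
          have hih := ih f hx
          rw [List.count_cons_self, List.count_cons_self]
          push_cast
          omega
      · have hyx : y ≠ x := fun h => hxy h.symm
        by_cases hy : 0 < f y
        · simp only [pvSkipF, if_pos hy]
          have hih := ih (pvUpd f y (f y - 1)) (by rw [pvUpd_ne f y _ x hxy]; exact hx)
          rw [pvUpd_ne f y _ x hxy] at hih
          rw [hih, List.count_cons_of_ne hyx]
        · simp only [pvSkipF, if_neg hy]
          rw [List.count_cons_of_ne hyx, List.count_cons_of_ne hyx, ih f hx]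

lemma pvSkipF_append_singleton (l : List String) (f : String → Int) (x : String)
    (h : f x ≤ (l.count x : Int)) : pvSkipF (l ++ [x]) f = pvSkipF l f ++ [x] := by
  induction l generalizing f with
  | nil =>
      simp only [List.count_nil, Nat.cast_zero] at h
      simp [pvSkipF, if_neg (show ¬ (0:Int) < f x by omega)]
  | cons y ys ih =>
      by_cases hxy : x = y
      · subst hxy
        rw [List.count_cons_self] at h
        by_cases hy : 0 < f x
        · simp only [List.cons_append, pvSkipF, if_pos hy]
          refine ih (pvUpd f x (f x - 1)) ?_
          rw [pvUpd_self]
          push_cast at h ⊢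
          omega
        · simp only [List.cons_append, pvSkipF, if_neg hy]
          rw [ih f (le_trans (not_lt.mp hy) (by positivity))]
      · have hyx : y ≠ x := fun hh => hxy hh.symm
        rw [List.count_cons_of_ne hyx] at h
        by_cases hy : 0 < f y
        · simp only [List.cons_append, pvSkipF, if_pos hy]
          refine ih (pvUpd f y (f y - 1)) ?_
          rw [pvUpd_ne f y _ x hxy]
          exact h
        · simp only [List.cons_append, pvSkipF, if_neg hy]
          rw [ih f h]

lemma pvSkipF_erase (l : List String) (f : String → Int) (x : String)
    (h0 : 0 ≤ f x) (hlt : f x < (l.count x : Int)) :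
    pvSkipF l (pvUpd f x (f x + 1)) = (pvSkipF l f).erase x := by
  induction l generalizing f with
  | nil => simp at hlt; omega
  | cons y ys ih =>
      by_cases hxy : y = x
      · subst hxy
        rw [List.count_cons_self] at hlt
        by_cases hy : 0 < f y
        · simp only [pvSkipF, pvUpd_self, pvUpd_upd]
          rw [if_pos (show (0:Int) < f y + 1 by omega), if_pos hy]
          rw [show f y + 1 - 1 = f y from by omega, pvUpd_id]
          have h' := ih (pvUpd f y (f y - 1)) (by rw [pvUpd_self]; omega)
            (by rw [pvUpd_self]; push_cast at hlt ⊢; omega)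
          rw [pvUpd_self, pvUpd_upd] at h'
          rw [show f y - 1 + 1 = f y from by omega, pvUpd_id] at h'
          exact h'
        · simp only [pvSkipF, pvUpd_self, pvUpd_upd]
          rw [if_pos (show (0:Int) < f y + 1 by omega), if_neg hy]
          rw [show f y + 1 - 1 = f y from by omega, pvUpd_id, List.erase_cons_head]
      · have hxy' : x ≠ y := fun h => hxy h.symm
        rw [List.count_cons_of_ne hxy] at hlt
        by_cases hy : 0 < f y
        · simp only [pvSkipF, pvUpd_ne f x _ y hxy]
          rw [if_pos hy, if_pos hy]
          rw [pvUpd_comm f x y _ _ hxy']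
          have h' := ih (pvUpd f y (f y - 1)) (by rw [pvUpd_ne f y _ x hxy']; exact h0)
            (by rw [pvUpd_ne f y _ x hxy']; exact hlt)
          rw [pvUpd_ne f y _ x hxy'] at h'
          exact h'
        · simp only [pvSkipF, pvUpd_ne f x _ y hxy]
          rw [if_neg hy, if_neg hy]
          rw [List.erase_cons_tail (by simp [hxy])]
          rw [ih f h0 hlt]

-- B's final fold computes pvSkipF
lemma foldl_revB_drop (l : List String) (d : PySem.Dict String Int) (acc : List String) :
    (l.foldl revB_drop (d, acc)).2 = acc ++ pvSkipF l (fun x => d.getD x 0) := by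
  induction l generalizing d acc with
  | nil => simp [pvSkipF]
  | cons x xs ih =>
      by_cases hx : 0 < d.getD x 0
      · simp only [List.foldl_cons, revB_drop, if_pos hx, pvSkipF, if_pos hx]
        rw [ih]
        congr 1
        congr 1
        funext y
        rw [PySem.Dict.getD_insert]
        by_cases hy : y = x <;> simp [pvUpd, hy]
      · simp only [List.foldl_cons, revB_drop, if_neg hx, pvSkipF, if_neg hx]
        rw [ih]
        simp

lemma pvCountSnoc (l : List String) (a x : String) :
    ((l ++ [a]).count x : Int) = (l.count x : Int) + (if x = a then 1 else 0) := by
  rw [List.count_append]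
  by_cases hx : x = a
  · subst hx; simp
  · have h0 : List.count x [a] = 0 := List.count_eq_zero.mpr (by simp [hx])
    simp [h0, hx]

-- the two main loops stay related step by step
lemma revAB_loop (pc : List Char) (pcSet : PySem.Set Char)
    (hset : ∀ ch : Char, ch ∈ pcSet ↔ ch ∈ pc) (casi0 co inc : List String) :
    ∀ (l : List Char) (s : Int) (cA iA app : List String) (cnt rem : PySem.Dict String Int),
      (∀ x, 0 ≤ rem.getD x 0) →
      (∀ x, rem.getD x 0 ≤ (((casi0 ++ app).count x : Int))) →
      (∀ x, cnt.getD x 0 = ((casi0 ++ app).count x : Int) - rem.getD x 0) →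
      (PySem.List.enumerate l s).foldl (revA_step pc)
          (co ++ cA, inc ++ iA, pvSkipF (casi0 ++ app) (fun y => rem.getD y 0)) =
        (co ++ ((PySem.List.enumerate l s).foldl (revB_step pc pcSet) (cnt, rem, cA, iA, app)).2.2.1,
         inc ++ ((PySem.List.enumerate l s).foldl (revB_step pc pcSet) (cnt, rem, cA, iA, app)).2.2.2.1,
         pvSkipF (casi0 ++ ((PySem.List.enumerate l s).foldl (revB_step pc pcSet) (cnt, rem, cA, iA, app)).2.2.2.2)
           (fun y => ((PySem.List.enumerate l s).foldl (revB_step pc pcSet) (cnt, rem, cA, iA, app)).2.1.getD y 0)) := by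
  intro l
  induction l with
  | nil => intro s cA iA app cnt rem h0 h1 h2; simp [PySem.List.enumerate]
  | cons ch rest ih =>
      intro s cA iA app cnt rem h0 h1 h2
      rw [PySem.List.enumerate_cons]
      simp only [List.foldl_cons]
      by_cases hg : PySem.List.pyGet? pc s = some ch
      · -- correct position
        by_cases hm : 0 < cnt.getD (String.ofList [ch]) 0
        · -- letter present in casi: A erases, B bumps rem
          have hc : ((pvSkipF (casi0 ++ app) (fun y => rem.getD y 0)).count (String.ofList [ch]) : Int) =
              max (((casi0 ++ app).count (String.ofList [ch]) : Int) - rem.getD (String.ofList [ch]) 0) 0 :=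
            pvSkipF_count (casi0 ++ app) (fun y => rem.getD y 0) (String.ofList [ch]) (h0 _)
          have hmem : String.ofList [ch] ∈ pvSkipF (casi0 ++ app) (fun y => rem.getD y 0) := by
            rw [← List.count_pos_iff]
            have h2' := h2 (String.ofList [ch])
            omega
          have hstepA : revA_step pc (co ++ cA, inc ++ iA, pvSkipF (casi0 ++ app) (fun y => rem.getD y 0)) (s, ch) =
              (co ++ (cA ++ [String.ofList [ch]]), inc ++ iA,
               (pvSkipF (casi0 ++ app) (fun y => rem.getD y 0)).erase (String.ofList [ch])) := by
            simp only [revA_step, hg, eq_self_iff_true, if_true]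
            rw [if_pos hmem, PySem.List.remove?_eq_some_erase _ _ hmem, Option.getD_some]
            simp [List.append_assoc]
          have hstepB : revB_step pc pcSet (cnt, rem, cA, iA, app) (s, ch) =
              (cnt.insert (String.ofList [ch]) (cnt.getD (String.ofList [ch]) 0 - 1),
               rem.insert (String.ofList [ch]) (rem.getD (String.ofList [ch]) 0 + 1),
               cA ++ [String.ofList [ch]], iA, app) := by
            simp only [revB_step, hg, eq_self_iff_true, if_true]
            rw [if_pos hm]
          rw [hstepA, hstepB]
          have hrem' : (fun y => (rem.insert (String.ofList [ch]) (rem.getD (String.ofList [ch]) 0 + 1)).getD y 0) =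
              pvUpd (fun y => rem.getD y 0) (String.ofList [ch]) (rem.getD (String.ofList [ch]) 0 + 1) := by
            funext y
            rw [PySem.Dict.getD_insert]
            by_cases hy : y = String.ofList [ch] <;> simp [pvUpd, hy]
          have herase : (pvSkipF (casi0 ++ app) (fun y => rem.getD y 0)).erase (String.ofList [ch]) =
              pvSkipF (casi0 ++ app)
                (fun y => (rem.insert (String.ofList [ch]) (rem.getD (String.ofList [ch]) 0 + 1)).getD y 0) := by
            rw [hrem']
            exact (pvSkipF_erase (casi0 ++ app) (fun y => rem.getD y 0) (String.ofList [ch]) (h0 _)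
              (by show rem.getD (String.ofList [ch]) 0 < (((casi0 ++ app).count (String.ofList [ch]) : Nat) : Int)
                  have := h2 (String.ofList [ch]); omega)).symm
          rw [herase]
          refine ih (s + 1) (cA ++ [String.ofList [ch]]) iA app _ _ ?_ ?_ ?_
          · intro x
            rw [PySem.Dict.getD_insert]
            by_cases hx : x = String.ofList [ch]
            · rw [if_pos hx]; have := h0 (String.ofList [ch]); subst hx; omega
            · rw [if_neg hx]; exact h0 x
          · intro x
            rw [PySem.Dict.getD_insert]
            by_cases hx : x = String.ofList [ch]
            · subst hx; rw [if_pos rfl]; have := h2 (String.ofList [ch]); omega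
            · rw [if_neg hx]; exact h1 x
          · intro x
            rw [PySem.Dict.getD_insert, PySem.Dict.getD_insert]
            by_cases hx : x = String.ofList [ch]
            · subst hx; rw [if_pos rfl, if_pos rfl]; have := h2 (String.ofList [ch]); omega
            · rw [if_neg hx, if_neg hx]; exact h2 x
        · -- letter not in casi
          have hc : ((pvSkipF (casi0 ++ app) (fun y => rem.getD y 0)).count (String.ofList [ch]) : Int) =
              max (((casi0 ++ app).count (String.ofList [ch]) : Int) - rem.getD (String.ofList [ch]) 0) 0 :=
            pvSkipF_count (casi0 ++ app) (fun y => rem.getD y 0) (String.ofList [ch]) (h0 _)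
          have hmem : String.ofList [ch] ∉ pvSkipF (casi0 ++ app) (fun y => rem.getD y 0) := by
            rw [← List.count_pos_iff]
            have h2' := h2 (String.ofList [ch])
            have h1' := h1 (String.ofList [ch])
            omega
          have hstepA : revA_step pc (co ++ cA, inc ++ iA, pvSkipF (casi0 ++ app) (fun y => rem.getD y 0)) (s, ch) =
              (co ++ (cA ++ [String.ofList [ch]]), inc ++ iA, pvSkipF (casi0 ++ app) (fun y => rem.getD y 0)) := by
            simp only [revA_step, hg, eq_self_iff_true, if_true]
            rw [if_neg hmem]
            simp [List.append_assoc]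
          have hstepB : revB_step pc pcSet (cnt, rem, cA, iA, app) (s, ch) =
              (cnt, rem, cA ++ [String.ofList [ch]], iA, app) := by
            simp only [revB_step, hg, eq_self_iff_true, if_true]
            rw [if_neg hm]
          rw [hstepA, hstepB]
          exact ih (s + 1) (cA ++ [String.ofList [ch]]) iA app cnt rem h0 h1 h2
      · by_cases hin : ch ∈ pc
        · -- wrong position, letter in word: append to casi / app
          have hstepA : revA_step pc (co ++ cA, inc ++ iA, pvSkipF (casi0 ++ app) (fun y => rem.getD y 0)) (s, ch) =
              (co ++ cA, inc ++ iA, pvSkipF (casi0 ++ app) (fun y => rem.getD y 0) ++ [String.ofList [ch]]) := by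
            simp only [revA_step]
            rw [if_neg hg, if_pos hin]
          have hstepB : revB_step pc pcSet (cnt, rem, cA, iA, app) (s, ch) =
              (cnt.insert (String.ofList [ch]) (cnt.getD (String.ofList [ch]) 0 + 1), rem, cA, iA,
               app ++ [String.ofList [ch]]) := by
            simp only [revB_step]
            rw [if_neg hg, if_pos ((hset ch).mpr hin)]
          rw [hstepA, hstepB]
          have happ : pvSkipF (casi0 ++ app) (fun y => rem.getD y 0) ++ [String.ofList [ch]] =
              pvSkipF (casi0 ++ (app ++ [String.ofList [ch]])) (fun y => rem.getD y 0) := by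
            rw [← List.append_assoc]
            exact (pvSkipF_append_singleton (casi0 ++ app) (fun y => rem.getD y 0) (String.ofList [ch])
              (h1 _)).symm
          rw [happ]
          refine ih (s + 1) cA iA (app ++ [String.ofList [ch]]) _ rem h0 ?_ ?_
          · intro x
            rw [← List.append_assoc, pvCountSnoc]
            have := h1 x
            split_ifs <;> omega
          · intro x
            rw [PySem.Dict.getD_insert, ← List.append_assoc, pvCountSnoc]
            have := h2 x
            split_ifs with hx
            · subst hx; omega
            · omega
        · -- letter not in word: incorrectas
          have hstepA : revA_step pc (co ++ cA, inc ++ iA, pvSkipF (casi0 ++ app) (fun y => rem.getD y 0)) (s, ch) =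
              (co ++ cA, inc ++ (iA ++ [String.ofList [ch]]), pvSkipF (casi0 ++ app) (fun y => rem.getD y 0)) := by
            simp only [revA_step]
            rw [if_neg hg, if_neg hin]
            simp [List.append_assoc]
          have hstepB : revB_step pc pcSet (cnt, rem, cA, iA, app) (s, ch) =
              (cnt, rem, cA, iA ++ [String.ofList [ch]], app) := by
            simp only [revB_step]
            rw [if_neg hg, if_neg (fun hc => hin ((hset ch).mp hc))]
          rw [hstepA, hstepB]
          exact ih (s + 1) cA (iA ++ [String.ofList [ch]]) app cnt rem h0 h1 h2

-- ===== VERDICT (by name: the statement is the Claim_ definition above) =====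
theorem revision_spec : Claim_equal_revision := by
  intro palabraCorrecta palabraUsuario correctas incorrectas casi hdom hpre
  simp only [Spec_revision, revision, revision_alt]
  set pc := (PySem.Str.lower (PySem.Str.replace palabraCorrecta "\n" "")).toList with hpc
  set pu := (PySem.Str.lower (PySem.Str.replace palabraUsuario "\n" "")).toList with hpu
  have hcnt0 : ∀ x, (casi.foldl (fun d x => d.insert x (d.getD x 0 + 1)) PySem.Dict.empty).getD x 0 =
      ((casi ++ ([] : List String)).count x : Int) - (PySem.Dict.empty : PySem.Dict String Int).getD x 0 := by
    intro x
    simp [PySem.Dict.getD_foldl_insert_add_one, PySem.Dict.getD_empty]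
  have hinit : pvSkipF (casi ++ ([] : List String))
      (fun y => (PySem.Dict.empty : PySem.Dict String Int).getD y 0) = casi := by
    rw [pvSkipF_zero _ _ (fun x => by rw [PySem.Dict.getD_empty])]
    simp
  have hmain := revAB_loop pc (PySem.Set.ofList pc) (fun ch => PySem.Set.mem_ofList pc ch)
      casi correctas incorrectas pu 0 [] [] []
      (casi.foldl (fun d x => d.insert x (d.getD x 0 + 1)) PySem.Dict.empty) PySem.Dict.empty
      (fun x => by rw [PySem.Dict.getD_empty])
      (fun x => by rw [PySem.Dict.getD_empty]; positivity)
      hcnt0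
  rw [hinit] at hmain
  simp only [List.append_nil] at hmain
  rw [hmain]
  rw [foldl_revB_drop]
  simp
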